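-- pv_equiv track=rewrite | github.com/OverPotter/TGSpyWare | module/getinfo.py | __ip_answer_formatting
-- ===== SOURCE A (Python) =====
-- def __ip_answer_formatting(ip_info: str) -> str:
--     ip_data_list = list(filter(None, ip_info.split("\n")))
--     ip_data_list.remove("CIDR")
--     answer_list = []
--     for i in range(len(ip_data_list)):
--         if (i + 1) % 2 != 0:
--             answer_list.append(f"{ip_data_list[i]}: ")
--         else:
--             answer_list.append(f"{ip_data_list[i]}\n")
--     return "".join(answer_list)
-- ===== SOURCE B (Python) =====
-- def __ip_answer_formatting(ip_info: str) -> str: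
--     lines = [s for s in ip_info.split("\n") if s]
--     lines.remove("CIDR")
--
--     def fmt(rest):
--         if not rest:
--             return ""
--         if len(rest) == 1:
--             return rest[0] + ": "
--         return rest[0] + ": " + rest[1] + "\n" + fmt(rest[2:])
--
--     return fmt(lines)
-- ===== Notes on version B (the rewrite author's own statement) =====
-- stated objective: alternative
-- what changed: Replaces A's iterative index-parity loop that accumulates tagged pieces in a list and joins them by a direct structural recursion on the cleaned list (two elements per step) that builds the output string by concatenation, with no loop, no accumulator list and no join; preprocessing (split, drop empties, remove('CIDR')) is kept.
import Mathlib
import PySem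

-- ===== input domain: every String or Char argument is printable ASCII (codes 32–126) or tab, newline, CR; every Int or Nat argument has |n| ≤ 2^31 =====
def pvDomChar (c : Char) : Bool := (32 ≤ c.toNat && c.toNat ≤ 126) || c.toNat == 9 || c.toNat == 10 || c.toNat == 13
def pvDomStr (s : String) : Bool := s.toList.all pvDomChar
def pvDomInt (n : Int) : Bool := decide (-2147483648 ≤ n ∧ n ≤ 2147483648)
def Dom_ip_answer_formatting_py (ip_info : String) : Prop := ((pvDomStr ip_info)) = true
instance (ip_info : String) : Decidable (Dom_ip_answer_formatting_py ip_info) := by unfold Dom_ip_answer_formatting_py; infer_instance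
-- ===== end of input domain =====

-- B replaces A's iterative index-parity loop (list of tagged pieces + join) by a direct
-- structural recursion on the cleaned list, two elements per step, concatenating the output.

-- ===== PORT A =====
def ip_answer_formatting_py (ip_info : String) : String :=
  let ip_data_list := (PySem.Chars.splitOn ip_info.toList ['\n']).filter (fun t => t != [])
  match PySem.List.remove? ip_data_list "CIDR".toList with
  | none => ""  -- Python raises ValueError here; excluded by Pre_
  | some l =>
      let answer_list := (PySem.List.pyRange 0 (l.length : Int) 1).foldl
        (fun acc i =>
          if PySem.Int.mod (i + 1) 2 != 0 then
            acc ++ [PySem.List.pyGetD l i [] ++ [':', ' ']]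
          else
            acc ++ [PySem.List.pyGetD l i [] ++ ['\n']]) []
      String.ofList (PySem.Chars.join [] answer_list)

-- ===== PORT B =====
-- Source B's recursive fmt: empty → "", lone key → "key: ", else "k: v\n" ++ fmt(rest[2:]).
def pvFmt : List (List Char) → List Char
  | [] => []
  | [k] => k ++ [':', ' ']
  | k :: v :: t => k ++ [':', ' '] ++ v ++ ['\n'] ++ pvFmt t

def ip_answer_formatting_py_alt (ip_info : String) : String :=
  let lines := (PySem.Chars.splitOn ip_info.toList ['\n']).filter (fun t => t != [])
  match PySem.List.remove? lines "CIDR".toList with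
  | none => ""  -- unreachable under Pre_ (Source B's lines.remove raises too)
  | some l => String.ofList (pvFmt l)

-- ===== PRECONDITION & SPEC =====
-- Pre_ excludes exactly the inputs whose non-empty lines do not contain the line "CIDR":
-- there list.remove("CIDR") raises ValueError in A (and in B alike).
def Pre_ip_answer_formatting_py (ip_info : String) : Prop :=
  "CIDR".toList ∈ (PySem.Chars.splitOn ip_info.toList ['\n']).filter (fun t => t != [])
-- (ip_info is a "whois" answer: alternating header lines such as "NetRange" and their
-- values; the "CIDR" header line is the one A's preprocessing removes.)
instance (ip_info : String) : Decidable (Pre_ip_answer_formatting_py ip_info) := by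
  unfold Pre_ip_answer_formatting_py; infer_instance

def pvWitness_ip_answer_formatting_py : String := "CIDR\n1.2.3.4\nname"

def Spec_ip_answer_formatting_py (ip_info : String) (out : String) : Prop := out = ip_answer_formatting_py_alt ip_info
instance (ip_info : String) (out : String) : Decidable (Spec_ip_answer_formatting_py ip_info out) := by unfold Spec_ip_answer_formatting_py; infer_instance

-- ===== CLAIM (what is proved, stated in full; the proofs are below) =====
def Claim_equal_ip_answer_formatting_py : Prop := ∀ (ip_info : String), Dom_ip_answer_formatting_py ip_info → Pre_ip_answer_formatting_py ip_info → Spec_ip_answer_formatting_py ip_info (ip_answer_formatting_py ip_info)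

-- ===== LEMMAS AND PROOFS =====

lemma pv_join_nil (xs : List (List Char)) : PySem.Chars.join [] xs = xs.flatten := by
  induction xs with
  | nil => rfl
  | cons x t ih => cases t <;> simp_all [PySem.Chars.join, List.intercalate, List.intersperse]

-- A's parity-tagged per-index pieces, indexed over List.range, concatenate to B's recursion.
lemma pv_key (l : List (List Char)) :
    (List.map (fun i =>
        if (i + 1) % 2 != 0 then l.getD i [] ++ [':', ' '] else l.getD i [] ++ ['\n'])
      (List.range l.length)).flatten
    = pvFmt l := by
  induction l using pvFmt.induct with
  | case1 => simp [pvFmt]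
  | case2 k => simp [pvFmt, List.range_one]
  | case3 k v t ih =>
      have hr : List.range (t.length + 2)
          = 0 :: 1 :: (List.range t.length).map (fun i => i + 2) := by
        rw [List.range_succ_eq_map, List.range_succ_eq_map]
        simp only [List.map_cons, List.map_map]
        refine congrArg₂ _ rfl (congrArg₂ _ rfl ?_)
        apply List.map_congr_left; intro i _; simp [Function.comp]
      show (List.map _ (List.range (t.length + 2))).flatten = _
      rw [hr]
      simp only [List.map_cons, List.map_map, List.flatten_cons]
      have hm : ∀ i ∈ List.range t.length,
          ((fun i => if (i + 1) % 2 != 0 then (k :: v :: t).getD i [] ++ [':', ' ']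
              else (k :: v :: t).getD i [] ++ ['\n']) ∘ (fun i => i + 2)) i
          = (fun i => if (i + 1) % 2 != 0 then t.getD i [] ++ [':', ' ']
              else t.getD i [] ++ ['\n']) i := by
        intro i _
        have h1 : ((i + 2 + 1) % 2 != 0) = ((i + 1) % 2 != 0) := by congr 1; omega
        simp only [Function.comp_apply, h1, List.getD, List.getElem?_cons_succ]
      rw [List.map_congr_left hm, ih]
      simp [pvFmt]

-- ===== VERDICT (by name: the statement is the Claim_ definition above) =====
theorem ip_answer_formatting_py_spec : Claim_equal_ip_answer_formatting_py := by
  intro ip _ hpre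
  unfold Pre_ip_answer_formatting_py at hpre
  have h := PySem.List.remove?_eq_some_erase _ "CIDR".toList hpre
  unfold Spec_ip_answer_formatting_py ip_answer_formatting_py ip_answer_formatting_py_alt
  simp only [h]
  set l := ((PySem.Chars.splitOn ip.toList ['\n']).filter (fun t => t != [])).erase "CIDR".toList with hl
  congr 1
  rw [pv_join_nil]
  rw [PySem.List.foldl_congr_mem _ _
        (fun acc i => acc ++ [if PySem.Int.mod (i + 1) 2 != 0 then
            PySem.List.pyGetD l i [] ++ [':', ' '] else PySem.List.pyGetD l i [] ++ ['\n']]) _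
        (by intro acc x _; exact (apply_ite (fun y => acc ++ [y]) _ _ _).symm)]
  rw [PySem.List.foldl_append_singleton_eq_map, PySem.List.pyRange_zero_natCast, List.map_map]
  rw [List.map_congr_left (l := List.range l.length)
        (f := _)
        (g := fun i => if (i + 1) % 2 != 0 then l.getD i [] ++ [':', ' '] else l.getD i [] ++ ['\n'])
        (by
          intro i _
          have hmod : PySem.Int.mod ((i : Int) + 1) 2 = (((i + 1) % 2 : Nat) : Int) := by
            exact_mod_cast PySem.Int.mod_natCast (i + 1) 2
          simp only [Function.comp_apply, hmod, PySem.List.pyGetD_natCast]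
          rcases Nat.mod_two_eq_zero_or_one (i + 1) with h2 | h2 <;> simp [h2])]
  simp only [List.nil_append]
  exact pv_key l
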